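-- pv_equiv track=rewrite | github.com/Ali-Arezoomandi/data_structure_and_algorithm_Dr_Ashrafi | data-structures-and-algorithms-ashrafi/python/src/recursive/problem_5/problem_5.py | max_finder_2
-- ===== SOURCE A (Python) =====
-- def max_finder_2(a, l):
--     if l == 0:
--         return a[l]
--     num1 = a[l - 1]
--     num2 = max_finder_2(a, l - 1)
--     if num1 > num2:
--         return num1
--     else:
--         return num2
-- ===== SOURCE B (Python) =====
-- def max_finder_2(a, l):
--     best = a[0]
--     for x in a[1:l]:
--         if x > best:
--             best = x
--     return best
-- ===== Notes on version B (the rewrite author's own statement) =====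
-- stated objective: simpler
-- what changed: Replaced A's recursion (max of a[l-1] and the recursive max of the prefix) by a single iterative running-maximum loop over the slice a[1:l] seeded with a[0].
import Mathlib
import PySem

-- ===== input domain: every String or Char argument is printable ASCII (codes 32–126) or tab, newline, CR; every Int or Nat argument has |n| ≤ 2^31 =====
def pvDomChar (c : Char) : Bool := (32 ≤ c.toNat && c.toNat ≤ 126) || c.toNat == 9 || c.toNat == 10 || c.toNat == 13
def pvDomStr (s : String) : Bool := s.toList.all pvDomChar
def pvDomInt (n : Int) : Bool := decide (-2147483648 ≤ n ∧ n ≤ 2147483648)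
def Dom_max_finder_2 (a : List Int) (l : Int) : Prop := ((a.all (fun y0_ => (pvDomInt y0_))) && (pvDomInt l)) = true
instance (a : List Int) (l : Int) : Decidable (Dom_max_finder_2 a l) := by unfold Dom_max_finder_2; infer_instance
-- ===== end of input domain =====

-- ===== PORT A =====
-- B replaces A's recursion by an iterative running maximum over a[1:l] seeded with a[0]; objective: simpler.
-- A's recursion descends l, l-1, …, 0; ported as structural recursion on the Nat count of remaining steps.
-- (For negative l the Python A recurses forever, outside Pre_; l.toNat lands in the base case there.)
def maxFinder2Rec (a : List Int) : Nat → Int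
  | 0 => (PySem.List.pyGet? a 0).getD 0
  | n+1 =>
      let num1 := (PySem.List.pyGet? a (n : Int)).getD 0
      let num2 := maxFinder2Rec a n
      if num1 > num2 then num1 else num2

def max_finder_2 (a : List Int) (l : Int) : Int := maxFinder2Rec a l.toNat

-- ===== PORT B =====
def max_finder_2_alt (a : List Int) (l : Int) : Int :=
  (PySem.List.slice a (some 1) (some l)).foldl
    (fun best x => if x > best then x else best)
    ((PySem.List.pyGet? a 0).getD 0)

-- ===== PRECONDITION & SPEC =====
-- Pre_ excludes exactly where Python A does not return: a = [] (IndexError at the base case)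
-- and negative l (infinite recursion); l ≤ len a keeps every accessed index a[l-1],…,a[0] in range.
def Pre_max_finder_2 (a : List Int) (l : Int) : Prop := 0 ≤ l ∧ l ≤ a.length ∧ a ≠ []
instance (a : List Int) (l : Int) : Decidable (Pre_max_finder_2 a l) := by unfold Pre_max_finder_2; infer_instance
def pvWitness_max_finder_2 : List Int × Int := ([3, 1, 4], 2)

def Spec_max_finder_2 (a : List Int) (l : Int) (out : Int) : Prop := out = max_finder_2_alt a l
instance (a : List Int) (l : Int) (out : Int) : Decidable (Spec_max_finder_2 a l out) := by unfold Spec_max_finder_2; infer_instance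

-- ===== CLAIM (what is proved, stated in full; the proofs are below) =====
def Claim_equal_max_finder_2 : Prop := ∀ (a : List Int) (l : Int), Dom_max_finder_2 a l → Pre_max_finder_2 a l → Spec_max_finder_2 a l (max_finder_2 a l)

-- ===== LEMMAS AND PROOFS =====

theorem maxFinder2Rec_eq_foldl (a : List Int) (n : Nat) (h : n + 1 ≤ a.length) :
    maxFinder2Rec a (n + 1) =
      ((a.drop 1).take n).foldl (fun best x => if x > best then x else best)
        ((PySem.List.pyGet? a 0).getD 0) := by
  induction n with
  | zero =>
      simp [maxFinder2Rec]
  | succ n ih =>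
      have hn : n + 1 ≤ a.length := by omega
      have hlt : n + 1 < a.length := by omega
      have hdlt : n < (a.drop 1).length := by simp; omega
      rw [show n + 1 + 1 = (n + 1) + 1 from rfl]
      rw [maxFinder2Rec, ih hn]
      rw [List.take_add_one]
      have hge : (a.drop 1)[n]? = some a[n + 1] := by
        rw [List.getElem?_eq_getElem hdlt]
        simp
      have hp : PySem.List.pyGet? a ((n : Int) + 1) = some a[n + 1] := by
        have hc : ((n : Int) + 1) = ((n + 1 : Nat) : Int) := by push_cast; ring
        rw [hc, PySem.List.pyGet?_natCast, List.getElem?_eq_getElem hlt]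
      rw [hge]
      simp only [List.foldl_append]
      push_cast
      rw [hp]
      rfl

-- ===== VERDICT (by name: the statement is the Claim_ definition above) =====
theorem max_finder_2_spec : Claim_equal_max_finder_2 := by
  intro a l _ hpre
  obtain ⟨hl0, hlen, hne⟩ := hpre
  unfold Spec_max_finder_2 max_finder_2 max_finder_2_alt
  obtain ⟨n, rfl⟩ : ∃ n : Nat, l = (n : Int) := ⟨l.toNat, (Int.toNat_of_nonneg hl0).symm⟩
  rw [show (1 : Int) = ((1 : Nat) : Int) by norm_num, PySem.List.slice_natCast]
  simp only [Int.toNat_natCast]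
  cases n with
  | zero => simp [maxFinder2Rec]
  | succ n =>
      have h : n + 1 ≤ a.length := by exact_mod_cast hlen
      rw [maxFinder2Rec_eq_foldl a n h]
      congr 1
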